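-- pv_equiv track=rewrite | github.com/marcosazcona00/SopDeLetrasProyecto | metodos_verificadores.py | verificar_diferencias
-- ===== SOURCE A (Python) =====
-- def verificar_diferencias(listaOrdenada):
--     '''
--         Verifica que la diferencia entre las letras no sea mayor a 1
--     '''
--     listaAuxiliar = list()
--     pos = 0
--     if(listaOrdenada != []): #Preguntamos si no está vacía porque pudo haber pasado que se hayan deseleccionador filas/columnas y quede una lista vacía
--         for i in range(1,len(listaOrdenada)):
--             if((listaOrdenada[i] - listaOrdenada[i-1] ) == 1):   #como arranca en 1  verifico el actual con el anterior
--                 listaAuxiliar.append(listaOrdenada[i-1])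
--                 pos = i
--             elif (listaAuxiliar != []):  #si la lista no esta vacia entonces la diferencia se produce al final por lo que las letras despues de esta no seran validas
--                 break
--         listaAuxiliar.append(listaOrdenada[pos])   #agrega el ultimo que falta
--     return listaAuxiliar
-- ===== SOURCE B (Python) =====
-- def verificar_diferencias(listaOrdenada):
--     n = len(listaOrdenada)
--     if n == 0:
--         return []
--     # phase 1: find the start of the first consecutive-by-1 run of length >= 2
--     i = 0
--     while i + 1 < n and listaOrdenada[i + 1] - listaOrdenada[i] != 1:
--         i += 1
--     if i + 1 == n:           # no such run: the original returns just the first element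
--         return [listaOrdenada[0]]
--     # phase 2: extend the run as far as it goes
--     j = i + 1
--     while j + 1 < n and listaOrdenada[j + 1] - listaOrdenada[j] == 1:
--         j += 1
--     return listaOrdenada[i:j + 1]
-- ===== Notes on version B (the rewrite author's own statement) =====
-- stated objective: simpler
-- what changed: Replaced the single stateful accumulate-with-break loop (appending predecessors and tracking pos) by a two-phase scan: find the start index of the first consecutive-by-1 run, then extend its end and return the slice; the fallback [first element] when no run exists mirrors A's pos=0 behaviour.
import Mathlib
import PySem

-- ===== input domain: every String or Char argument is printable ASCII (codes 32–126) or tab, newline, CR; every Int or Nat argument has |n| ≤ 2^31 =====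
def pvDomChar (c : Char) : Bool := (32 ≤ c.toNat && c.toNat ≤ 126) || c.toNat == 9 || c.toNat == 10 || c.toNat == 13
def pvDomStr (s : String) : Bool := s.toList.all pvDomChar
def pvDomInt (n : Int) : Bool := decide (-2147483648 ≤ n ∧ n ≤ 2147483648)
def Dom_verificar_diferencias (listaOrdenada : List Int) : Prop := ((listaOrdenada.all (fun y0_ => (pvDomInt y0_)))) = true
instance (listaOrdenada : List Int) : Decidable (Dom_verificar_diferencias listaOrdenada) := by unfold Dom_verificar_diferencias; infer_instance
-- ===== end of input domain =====

-- B replaces A's accumulate-with-break loop by a find-run-start / extend-run-end / slice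
-- decomposition (objective: simpler); same return value on every input, both total.

-- ===== PORT A =====
-- the for-loop over range(1, len) with its break, as a recursion on the index i;
-- all indices are nonnegative and in range, so List.getD is exact for listaOrdenada[i]
def verAux (l : List Int) (i : Nat) (aux : List Int) (pos : Nat) : List Int × Nat :=
  if h : i < l.length then
    if l.getD i 0 - l.getD (i - 1) 0 = 1 then
      verAux l (i + 1) (aux ++ [l.getD (i - 1) 0]) i
    else if aux ≠ [] then (aux, pos)          -- break
    else verAux l (i + 1) aux pos
  else (aux, pos)
termination_by l.length - i
decreasing_by all_goals omega

def verificar_diferencias (listaOrdenada : List Int) : List Int :=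
  if listaOrdenada ≠ [] then
    let r := verAux listaOrdenada 1 [] 0
    r.1 ++ [listaOrdenada.getD r.2 0]
  else []

-- ===== PORT B =====
-- phase 1 of Source B: advance i while the next difference is not 1
def findStart (l : List Int) (i : Nat) : Nat :=
  if h : i + 1 < l.length ∧ l.getD (i + 1) 0 - l.getD i 0 ≠ 1 then findStart l (i + 1) else i
termination_by l.length - i
decreasing_by omega

-- phase 2 of Source B: advance j while the next difference is 1
def findEnd (l : List Int) (j : Nat) : Nat :=
  if h : j + 1 < l.length ∧ l.getD (j + 1) 0 - l.getD j 0 = 1 then findEnd l (j + 1) else j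
termination_by l.length - j
decreasing_by omega

def verificar_diferencias_alt (listaOrdenada : List Int) : List Int :=
  if listaOrdenada.length = 0 then []
  else
    let i := findStart listaOrdenada 0
    if i + 1 = listaOrdenada.length then [listaOrdenada.getD 0 0]
    else
      let j := findEnd listaOrdenada (i + 1)
      PySem.List.slice listaOrdenada (some (i : Int)) (some ((j : Int) + 1))

-- ===== PRECONDITION & SPEC =====
def Spec_verificar_diferencias (listaOrdenada : List Int) (out : List Int) : Prop := out = verificar_diferencias_alt listaOrdenada
instance (listaOrdenada : List Int) (out : List Int) : Decidable (Spec_verificar_diferencias listaOrdenada out) := by unfold Spec_verificar_diferencias; infer_instance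

-- ===== CLAIM (what is proved, stated in full; the proofs are below) =====
def Claim_equal_verificar_diferencias : Prop := ∀ (listaOrdenada : List Int), Dom_verificar_diferencias listaOrdenada → Spec_verificar_diferencias listaOrdenada (verificar_diferencias listaOrdenada)

-- ===== LEMMAS AND PROOFS =====

theorem findEnd_ge (l : List Int) (j : Nat) : j ≤ findEnd l j := by
  unfold findEnd
  split
  · exact Nat.le_trans (Nat.le_succ j) (findEnd_ge l (j + 1))
  · exact Nat.le_refl j
termination_by l.length - j
decreasing_by omega

theorem findEnd_lt (l : List Int) (j : Nat) (h : j < l.length) : findEnd l j < l.length := by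
  unfold findEnd
  split
  · exact findEnd_lt l (j + 1) (by omega)
  · exact h
termination_by l.length - j
decreasing_by omega

theorem findStart_le (l : List Int) (j : Nat) (h : j + 1 ≤ l.length) : findStart l j + 1 ≤ l.length := by
  unfold findStart
  split
  · next hc => exact findStart_le l (j + 1) (by omega)
  · exact h
termination_by l.length - j
decreasing_by omega

-- the stopping condition fails at findStart's result
theorem findStart_stop (l : List Int) (j : Nat) :
    ¬(findStart l j + 1 < l.length ∧ l.getD (findStart l j + 1) 0 - l.getD (findStart l j) 0 ≠ 1) := by
  unfold findStart
  split
  · exact findStart_stop l (j + 1)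
  · next hc => exact hc
termination_by l.length - j
decreasing_by omega

theorem drop_take_cons (l : List Int) (i e : Nat) (h1 : 1 ≤ i) (hi : i - 1 < l.length) (he : i ≤ e) :
    (l.drop (i - 1)).take (e - (i - 1)) = l.getD (i - 1) 0 :: (l.drop i).take (e - i) := by
  rw [List.drop_eq_getElem_cons hi]
  have h2 : i - 1 + 1 = i := by omega
  have h3 : e - (i - 1) = (e - i) + 1 := by omega
  rw [h2, h3, List.take_succ_cons, List.getD_eq_getElem l 0 hi]

-- collect phase: once aux is nonempty, A keeps appending while differences are 1
theorem verAux_collect (l : List Int) (i : Nat) (aux : List Int) (h1 : 1 ≤ i) (hne : aux ≠ []) :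
    verAux l i aux (i - 1) =
      (aux ++ (l.drop (i - 1)).take (findEnd l (i - 1) - (i - 1)), findEnd l (i - 1)) := by
  have h2 : i - 1 + 1 = i := by omega
  unfold verAux
  by_cases h : i < l.length
  · rw [dif_pos h]
    by_cases hd : l.getD i 0 - l.getD (i - 1) 0 = 1
    · rw [if_pos hd]
      have key := verAux_collect l (i + 1) (aux ++ [l.getD (i - 1) 0]) (by omega) (by simp)
      simp only [Nat.add_sub_cancel] at key
      rw [key]
      have hEnd : findEnd l (i - 1) = findEnd l i := by
        conv_lhs => unfold findEnd
        rw [h2, dif_pos ⟨h, hd⟩]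
      rw [hEnd, drop_take_cons l i (findEnd l i) h1 (by omega) (findEnd_ge l i)]
      simp
    · rw [if_neg hd, if_pos hne]
      have hEnd : findEnd l (i - 1) = i - 1 := by
        conv_lhs => unfold findEnd
        rw [h2, dif_neg (by intro hc; exact hd hc.2)]
      rw [hEnd]
      simp
  · rw [dif_neg h]
    have hEnd : findEnd l (i - 1) = i - 1 := by
      conv_lhs => unfold findEnd
      rw [h2, dif_neg (by intro hc; exact h hc.1)]
    rw [hEnd]
    simp
termination_by l.length - i
decreasing_by all_goals omega

-- skip phase: A with empty accumulator behaves like findStart then the collect phase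
theorem verAux_skip (l : List Int) (i : Nat) (h1 : 1 ≤ i) :
    verAux l i [] 0 =
      if findStart l (i - 1) + 1 < l.length then
        ((l.drop (findStart l (i - 1))).take (findEnd l (findStart l (i - 1)) - findStart l (i - 1)),
          findEnd l (findStart l (i - 1)))
      else ([], 0) := by
  have h2 : i - 1 + 1 = i := by omega
  unfold verAux
  by_cases h : i < l.length
  · rw [dif_pos h]
    by_cases hd : l.getD i 0 - l.getD (i - 1) 0 = 1
    · rw [if_pos hd]
      have hS : findStart l (i - 1) = i - 1 := by
        conv_lhs => unfold findStart
        rw [h2, dif_neg (by intro hc; exact hc.2 hd)]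
      rw [hS, h2, if_pos h]
      have key := verAux_collect l (i + 1) ([] ++ [l.getD (i - 1) 0]) (by omega) (by simp)
      simp only [Nat.add_sub_cancel] at key
      rw [key]
      have hEnd : findEnd l (i - 1) = findEnd l i := by
        conv_lhs => unfold findEnd
        rw [h2, dif_pos ⟨h, hd⟩]
      rw [hEnd, drop_take_cons l i (findEnd l i) h1 (by omega) (findEnd_ge l i)]
      simp
    · rw [if_neg hd]
      simp only [ne_eq, not_true_eq_false, if_false]
      have hS : findStart l (i - 1) = findStart l i := by
        conv_lhs => unfold findStart
        rw [h2, dif_pos ⟨h, hd⟩]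
      rw [hS]
      have := verAux_skip l (i + 1) (by omega)
      simpa using this
  · rw [dif_neg h]
    have hS : findStart l (i - 1) = i - 1 := by
      conv_lhs => unfold findStart
      rw [h2, dif_neg (by intro hc; exact h hc.1)]
    rw [hS, h2, if_neg h]
termination_by l.length - i
decreasing_by all_goals omega

theorem take_append_getD (l : List Int) (s e : Nat) (hse : s ≤ e) (he : e < l.length) :
    (l.drop s).take (e - s) ++ [l.getD e 0] = (l.drop s).take (e + 1 - s) := by
  have h3 : e + 1 - s = (e - s) + 1 := by omega
  rw [h3, List.take_add_one]
  have : (l.drop s)[e - s]? = some l[e] := by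
    rw [List.getElem?_drop]
    rw [List.getElem?_eq_getElem (by omega)]
    congr 1
    congr 1
    omega
  rw [this, List.getD_eq_getElem l 0 he]
  simp

-- ===== VERDICT (by name: the statement is the Claim_ definition above) =====
theorem verificar_diferencias_spec : Claim_equal_verificar_diferencias := by
  intro l _
  unfold Spec_verificar_diferencias verificar_diferencias verificar_diferencias_alt
  by_cases hl : l = []
  · subst hl; simp
  · have hlen : 1 ≤ l.length := by
      cases l with
      | nil => exact absurd rfl hl
      | cons a t => simp
    rw [if_pos hl, if_neg (by omega)]
    have hskip := verAux_skip l 1 (by omega)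
    simp only [Nat.sub_self] at hskip
    set s := findStart l 0 with hs
    by_cases hc : s + 1 < l.length
    · rw [if_pos hc] at hskip
      rw [hskip]
      rw [if_neg (by omega)]
      simp only []
      -- d s = 1 at the stop point of findStart, so findEnd l s = findEnd l (s+1)
      have hd1 : l.getD (s + 1) 0 - l.getD s 0 = 1 := by
        have := findStart_stop l 0
        rw [← hs] at this
        by_contra hne
        exact this ⟨hc, hne⟩
      have hEnd : findEnd l s = findEnd l (s + 1) := by
        conv_lhs => unfold findEnd
        rw [dif_pos ⟨hc, hd1⟩]
      set e := findEnd l (s + 1) with heq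
      have hge : s + 1 ≤ e := findEnd_ge l (s + 1)
      have hlt : e < l.length := findEnd_lt l (s + 1) hc
      rw [hEnd]
      rw [take_append_getD l s e (by omega) hlt]
      have hcast : (e : Int) + 1 = ((e + 1 : Nat) : Int) := by push_cast; ring
      rw [hcast, PySem.List.slice_natCast]
    · rw [if_neg hc] at hskip
      rw [hskip]
      have hle : s + 1 ≤ l.length := findStart_le l 0 hlen
      rw [if_pos (by omega)]
      simp
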